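-- pv_equiv track=rewrite | github.com/Shreyanshraj12/practice6 | question1.py | reconstructPermutation
-- ===== SOURCE A (Python) =====
-- def reconstructPermutation(s):
--     perm = []
--     low, high = 0, len(s)
--
--     for c in s:
--         if c == 'I':
--             perm.append(low)
--             low += 1
--         elif c == 'D':
--             perm.append(high)
--             high -= 1
--
--     perm.append(low)
--
--     return perm
-- ===== SOURCE B (Python) =====
-- def reconstructPermutation(s):
--     filtered = [c for c in s if c in ('I', 'D')]
--     n = len(s)
--     preI, preD = [], []
--     i = d = 0
--     for c in filtered:
--         preI.append(i)
--         preD.append(d)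
--         i += (c == 'I')
--         d += (c == 'D')
--     out = [pi if c == 'I' else n - pd
--            for c, pi, pd in zip(filtered, preI, preD)]
--     out.append(i)
--     return out
-- ===== Notes on version B (the rewrite author's own statement) =====
-- stated objective: alternative
-- what changed: B replaces A's single stateful pass (low/high counters mutated while appending) with a pre-filter of the I/D characters, prefix I- and D-count tables built in a separate pass, and a pure zip-map that computes each slot from its prefix counts.
import Mathlib
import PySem

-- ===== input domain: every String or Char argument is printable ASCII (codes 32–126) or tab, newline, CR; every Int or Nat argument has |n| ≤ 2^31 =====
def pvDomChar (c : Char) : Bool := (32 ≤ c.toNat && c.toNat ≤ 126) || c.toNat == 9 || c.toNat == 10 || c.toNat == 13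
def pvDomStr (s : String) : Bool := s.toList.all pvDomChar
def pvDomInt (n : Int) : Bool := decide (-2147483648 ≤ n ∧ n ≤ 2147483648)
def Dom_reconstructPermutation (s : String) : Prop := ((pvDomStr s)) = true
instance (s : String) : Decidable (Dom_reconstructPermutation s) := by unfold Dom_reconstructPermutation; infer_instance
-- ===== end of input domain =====

-- B replaces A's single stateful pass (low/high counters mutated while appending) with a
-- pre-filter, prefix I/D count tables and a pure zip-map; alternative decomposition, same cost.

-- ===== PORT A =====
def reconstructPermutation (s : String) : List Int :=
  let st := s.toList.foldl
    (fun (st : List Int × Int × Int) c =>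
      if c == 'I' then (st.1 ++ [st.2.1], st.2.1 + 1, st.2.2)
      else if c == 'D' then (st.1 ++ [st.2.2], st.2.1, st.2.2 - 1)
      else st)
    ([], 0, (s.toList.length : Int))
  st.1 ++ [st.2.1]

-- ===== PORT B =====
def reconstructPermutation_alt (s : String) : List Int :=
  let filtered := s.toList.filter (fun c => c == 'I' || c == 'D')
  let n : Int := (s.toList.length : Int)
  let st := filtered.foldl
    (fun (st : List Int × List Int × Int × Int) c =>
      (st.1 ++ [st.2.2.1], st.2.1 ++ [st.2.2.2],
       st.2.2.1 + (if c == 'I' then 1 else 0),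
       st.2.2.2 + (if c == 'D' then 1 else 0)))
    ([], [], 0, 0)
  let out := (filtered.zip (st.1.zip st.2.1)).map
    (fun t => if t.1 == 'I' then t.2.1 else n - t.2.2)
  out ++ [st.2.2.1]

-- ===== PRECONDITION & SPEC =====
def Spec_reconstructPermutation (s : String) (out : List Int) : Prop := out = reconstructPermutation_alt s
instance (s : String) (out : List Int) : Decidable (Spec_reconstructPermutation s out) := by unfold Spec_reconstructPermutation; infer_instance

-- ===== CLAIM (what is proved, stated in full; the proofs are below) =====
def Claim_equal_reconstructPermutation : Prop := ∀ (s : String), Dom_reconstructPermutation s → Spec_reconstructPermutation s (reconstructPermutation s)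

-- ===== LEMMAS AND PROOFS =====

-- A's loop body, named for the lemmas (definitionally the lambda in the port of A).
def pvStepA (st : List Int × Int × Int) (c : Char) : List Int × Int × Int :=
  if c == 'I' then (st.1 ++ [st.2.1], st.2.1 + 1, st.2.2)
  else if c == 'D' then (st.1 ++ [st.2.2], st.2.1, st.2.2 - 1)
  else st

-- B's loop body, named for the lemmas (definitionally the lambda in the port of B).
def pvStepB (st : List Int × List Int × Int × Int) (c : Char) : List Int × List Int × Int × Int :=
  (st.1 ++ [st.2.2.1], st.2.1 ++ [st.2.2.2],
   st.2.2.1 + (if c == 'I' then 1 else 0),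
   st.2.2.2 + (if c == 'D' then 1 else 0))

-- canonical result of the loop part on the filtered (all-'I'/'D') characters
def pvBody (low high : Int) : List Char → List Int
  | [] => []
  | c :: t => if c = 'I' then low :: pvBody (low + 1) high t else high :: pvBody low (high - 1) t

theorem pvBody_length (fl : List Char) : ∀ (low high : Int), (pvBody low high fl).length = fl.length := by
  induction fl with
  | nil => intro low high; rfl
  | cons c t ih =>
    intro low high
    by_cases hc : c = 'I' <;> simp [pvBody, hc, ih]

theorem pvBody_getElem (fl : List Char) : ∀ (low high : Int) (k : Nat) (hk : k < fl.length),
    (∀ c ∈ fl, c = 'I' ∨ c = 'D') →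
    (pvBody low high fl)[k]'(by rw [pvBody_length]; exact hk) =
      if fl[k] = 'I' then low + ((fl.take k).count 'I' : Int)
      else high - ((fl.take k).count 'D' : Int) := by
  induction fl with
  | nil => intro low high k hk _; exact absurd hk (by simp)
  | cons c t ih =>
    intro low high k hk hm
    have ht : ∀ x ∈ t, x = 'I' ∨ x = 'D' := fun x hx => hm x (List.mem_cons_of_mem _ hx)
    rcases hm c List.mem_cons_self with hc | hc
    · subst hc
      cases k with
      | zero => simp [pvBody]
      | succ k =>
        have hk' : k < t.length := by simpa using hk
        have hih := ih (low + 1) high k hk' ht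
        have hbody : pvBody low high ('I' :: t) = low :: pvBody (low + 1) high t := by
          simp [pvBody]
        rw [List.getElem_of_eq hbody, List.getElem_cons_succ, hih]
        simp only [List.getElem_cons_succ, List.take_succ_cons]
        split_ifs <;> simp [List.count_cons] <;> push_cast <;> omega
    · subst hc
      cases k with
      | zero => simp [pvBody]
      | succ k =>
        have hk' : k < t.length := by simpa using hk
        have hih := ih low (high - 1) k hk' ht
        have hbody : pvBody low high ('D' :: t) = high :: pvBody low (high - 1) t := by
          simp [pvBody]
        rw [List.getElem_of_eq hbody, List.getElem_cons_succ, hih]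
        simp only [List.getElem_cons_succ, List.take_succ_cons]
        split_ifs <;> simp [List.count_cons] <;> push_cast <;> omega

-- A's fold on a list of pure 'I'/'D' characters
theorem pvFoldA (fl : List Char) : ∀ (acc : List Int) (low high : Int),
    (∀ c ∈ fl, c = 'I' ∨ c = 'D') →
    fl.foldl pvStepA (acc, low, high) =
      (acc ++ pvBody low high fl, low + (fl.count 'I' : Int), high - (fl.count 'D' : Int)) := by
  induction fl with
  | nil => intro acc low high _; simp [pvBody]
  | cons c t ih =>
    intro acc low high hmem
    have ht : ∀ x ∈ t, x = 'I' ∨ x = 'D' := fun x hx => hmem x (List.mem_cons_of_mem _ hx)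
    rcases hmem c List.mem_cons_self with hc | hc
    · subst hc
      have hstep : pvStepA (acc, low, high) 'I' = (acc ++ [low], low + 1, high) := by
        simp [pvStepA]
      rw [List.foldl_cons, hstep, ih _ _ _ ht]
      simp only [Prod.mk.injEq]
      refine ⟨?_, ?_, ?_⟩
      · simp [pvBody, List.append_assoc]
      · simp [List.count_cons]; push_cast; omega
      · simp [List.count_cons]
    · subst hc
      have hstep : pvStepA (acc, low, high) 'D' = (acc ++ [high], low, high - 1) := by
        simp [pvStepA]
      rw [List.foldl_cons, hstep, ih _ _ _ ht]
      simp only [Prod.mk.injEq]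
      refine ⟨?_, ?_, ?_⟩
      · simp [pvBody, List.append_assoc]
      · simp [List.count_cons]
      · simp [List.count_cons]; push_cast; omega

-- non-I/D characters do not change A's state
theorem pvFoldA_filter (l : List Char) : ∀ (st : List Int × Int × Int),
    l.foldl pvStepA st = (l.filter (fun c => c == 'I' || c == 'D')).foldl pvStepA st := by
  induction l with
  | nil => intro st; rfl
  | cons c t ih =>
    intro st
    by_cases hI : c == 'I'
    · simp [List.filter_cons, hI, List.foldl_cons, ih]
    · by_cases hD : c == 'D'
      · simp [List.filter_cons, hI, hD, List.foldl_cons, ih]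
      · simp only [List.foldl_cons, List.filter_cons, hI, hD]
        have : pvStepA st c = st := by simp [pvStepA, hI, hD]
        simp [this, ih]

-- B's fold: the four components in closed form
theorem pvFoldB (fl : List Char) : ∀ (aI aD : List Int) (i d : Int),
    fl.foldl pvStepB (aI, aD, i, d) =
      (aI ++ (List.range fl.length).map (fun k => i + ((fl.take k).count 'I' : Int)),
       aD ++ (List.range fl.length).map (fun k => d + ((fl.take k).count 'D' : Int)),
       i + (fl.count 'I' : Int), d + (fl.count 'D' : Int)) := by
  induction fl with
  | nil => intro aI aD i d; simp
  | cons c t ih =>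
    intro aI aD i d
    rw [List.foldl_cons]
    show List.foldl pvStepB (aI ++ [i], aD ++ [d],
        i + (if c == 'I' then 1 else 0), d + (if c == 'D' then 1 else 0)) t = _
    rw [ih]
    have hrange : List.range (c :: t).length = 0 :: (List.range t.length).map (· + 1) := by
      simp [List.length_cons, List.range_succ_eq_map]
    rw [hrange]
    simp only [List.map_cons, List.map_map]
    simp only [Prod.mk.injEq]
    refine ⟨?_, ?_, ?_, ?_⟩
    · rw [List.append_assoc]
      simp only [List.singleton_append, List.take_zero, List.count_nil, Nat.cast_zero, add_zero]
      congr 1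
      congr 1
      apply List.map_congr_left
      intro k _
      simp only [Function.comp, List.take_succ_cons, List.count_cons]
      by_cases hc : c = 'I' <;> simp [hc] <;> push_cast <;> omega
    · rw [List.append_assoc]
      simp only [List.singleton_append, List.take_zero, List.count_nil, Nat.cast_zero, add_zero]
      congr 1
      congr 1
      apply List.map_congr_left
      intro k _
      simp only [Function.comp, List.take_succ_cons, List.count_cons]
      by_cases hc : c = 'D' <;> simp [hc] <;> push_cast <;> omega
    · simp only [List.count_cons]
      by_cases hc : c = 'I' <;> simp [hc] <;> push_cast <;> omega
    · simp only [List.count_cons]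
      by_cases hc : c = 'D' <;> simp [hc] <;> push_cast <;> omega

-- the zip-map of B's port equals pvBody 0 n
theorem pvZipMap_eq_body (fl : List Char) (n : Int)
    (hm : ∀ c ∈ fl, c = 'I' ∨ c = 'D') :
    ((fl.zip (((List.range fl.length).map (fun k => ((fl.take k).count 'I' : Int))).zip
              ((List.range fl.length).map (fun k => ((fl.take k).count 'D' : Int))))).map
      (fun t => if t.1 == 'I' then t.2.1 else n - t.2.2)) = pvBody 0 n fl := by
  apply List.ext_getElem
  · simp [pvBody_length]
  · intro k h1 h2
    have hk : k < fl.length := by rw [pvBody_length] at h2; exact h2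
    rw [pvBody_getElem fl 0 n k hk hm]
    simp only [List.getElem_map, List.getElem_zip, List.getElem_range]
    by_cases hc : fl[k] = 'I' <;> simp [hc]

theorem reconstructPermutation_eq_body (s : String) :
    reconstructPermutation s =
      pvBody 0 (s.toList.length : Int) (s.toList.filter (fun c => c == 'I' || c == 'D')) ++
        [((s.toList.filter (fun c => c == 'I' || c == 'D')).count 'I' : Int)] := by
  show (s.toList.foldl pvStepA ([], 0, (s.toList.length : Int))).1 ++
        [(s.toList.foldl pvStepA ([], 0, (s.toList.length : Int))).2.1] = _
  rw [pvFoldA_filter]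
  rw [pvFoldA _ [] 0 (s.toList.length : Int)
      (by intro c hc; have := List.of_mem_filter hc; simpa using this)]
  simp

theorem reconstructPermutation_alt_eq_body (s : String) :
    reconstructPermutation_alt s =
      pvBody 0 (s.toList.length : Int) (s.toList.filter (fun c => c == 'I' || c == 'D')) ++
        [((s.toList.filter (fun c => c == 'I' || c == 'D')).count 'I' : Int)] := by
  show (let filtered := s.toList.filter (fun c => c == 'I' || c == 'D')
        let n : Int := (s.toList.length : Int)
        let st := filtered.foldl pvStepB ([], [], 0, 0)
        let out := (filtered.zip (st.1.zip st.2.1)).map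
          (fun t => if t.1 == 'I' then t.2.1 else n - t.2.2)
        out ++ [st.2.2.1]) = _
  simp only
  rw [pvFoldB _ [] [] 0 0]
  simp only [List.nil_append, Int.zero_add]
  rw [pvZipMap_eq_body _ _ (by intro c hc; have := List.of_mem_filter hc; simpa using this)]

-- ===== VERDICT (by name: the statement is the Claim_ definition above) =====
theorem reconstructPermutation_spec : Claim_equal_reconstructPermutation := by
  intro s _
  show reconstructPermutation s = reconstructPermutation_alt s
  rw [reconstructPermutation_eq_body, reconstructPermutation_alt_eq_body]
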